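-- pv_equiv track=rewrite | github.com/nathanmwhite/window-data-augmentation | sents_util.py | retrieve_sents
-- ===== SOURCE A (Python) =====
-- def retrieve_sents(data_stream,
--                    left_slide=False,
--                    right_slide=False,
--                    lim_slide=False,
--                    split_comma=False,
--                    lim=0):
--   sents = []
--   current_sent = []
--   slides = {}
--   for i in range(lim):
--     slides[i] = []
--   for j, item in enumerate(data_stream):
--     current_sent.append(item)
--     if lim_slide == True:
--       if j < lim:
--         # j + 1 because otherwise initial sequences would have len > lim
--         for i in range(j + 1):
--           slides[i].append(item)
--       # previous comment: this doesn't handle the last several instances correctly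
--       # confirmed already fixed as of 4 August 2022
--       else:
--         # check modulo, and add to sents, and clear dict entry
--         current_slide = j % lim
--         sents.append(slides[current_slide])
--         slides[current_slide] = []
--         # then add current word to all dict entries
--         for i in range(lim):
--           slides[i].append(item)
--     else:
--       if split_comma:
--         split = ['.', ',']
--       else:
--         split = ['.']
--       if item[0] in split:
--         if len(current_sent) >= 3:
--           # handle aligned versions
--           if left_slide == True:
--             sent_windows = []
--             for i in range(len(current_sent) - 1, 1, -1):
--               sent_windows.append(current_sent[:i])
--             sents += sent_windows
--           if right_slide == True:
--             sent_windows = []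
--             for i in range(1, len(current_sent) - 1):
--               sent_windows.append(current_sent[i:])
--             sents += sent_windows
--
--         # handle the basic current_sent in any case
--         if len(current_sent) >= 2:
--           sents.append(current_sent)
--           current_sent = []
--         else:  # clear single sentence of comma or period
--           current_sent = []
--
--   # append whatever is left over at the end of a text (if no final comma or
--   #  period); if lim_slide, only include the last complete unit
--   if lim_slide == True:
--     for i in range(lim):
--       if len(slides[i]) == lim:
--         sents.append(slides[i])
--   else:
--     if current_sent != []:
--       sents.append(current_sent)
--   return sents
-- ===== SOURCE B (Python) =====
-- def retrieve_sents(data_stream,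
--                    left_slide=False,
--                    right_slide=False,
--                    lim_slide=False,
--                    split_comma=False,
--                    lim=0):
--   data = list(data_stream)
--   if lim_slide:
--     # sliding windows of length lim, directly by slicing
--     if lim <= 0:
--       return []
--     return [data[i:i + lim] for i in range(len(data) - lim + 1)]
--   seps = ('.', ',') if split_comma else ('.',)
--   sents = []
--   rest = data
--   while True:
--     # index of the first separator token still unconsumed
--     k = next((j for j, item in enumerate(rest) if item[0] in seps), None)
--     if k is None:
--       break
--     sent, rest = rest[:k + 1], rest[k + 1:]
--     n = k + 1
--     if n >= 3:
--       if left_slide: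
--         sents += [sent[:i] for i in range(n - 1, 1, -1)]
--       if right_slide:
--         sents += [sent[i:] for i in range(1, n - 1)]
--     if n >= 2:
--       sents.append(sent)
--   if rest:
--     sents.append(rest)
--   return sents
-- ===== Notes on version B (the rewrite author's own statement) =====
-- stated objective: simpler
-- what changed: lim_slide windows are produced directly as slices data[i:i+lim] instead of a dict of lim rotating buffers, and sentence splitting repeatedly finds the first separator and slices the sentence off instead of growing a current_sent accumulator item by item.
import Mathlib
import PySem

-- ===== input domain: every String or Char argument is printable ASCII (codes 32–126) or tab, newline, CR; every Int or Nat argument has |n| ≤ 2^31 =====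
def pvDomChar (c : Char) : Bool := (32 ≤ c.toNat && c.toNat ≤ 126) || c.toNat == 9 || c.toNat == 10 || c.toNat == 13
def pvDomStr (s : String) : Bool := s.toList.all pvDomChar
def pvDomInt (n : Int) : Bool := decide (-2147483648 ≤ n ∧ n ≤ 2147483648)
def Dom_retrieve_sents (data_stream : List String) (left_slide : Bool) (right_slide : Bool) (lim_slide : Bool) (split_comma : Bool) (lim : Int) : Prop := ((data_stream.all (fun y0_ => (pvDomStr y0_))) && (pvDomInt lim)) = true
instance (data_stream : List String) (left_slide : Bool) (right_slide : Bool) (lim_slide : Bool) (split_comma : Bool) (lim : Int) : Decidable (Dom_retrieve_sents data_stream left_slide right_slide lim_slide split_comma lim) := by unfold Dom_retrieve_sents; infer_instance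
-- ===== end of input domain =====

-- B replaces A's dict of rotating window buffers by direct slicing (lim_slide mode) and the
-- item-by-item current_sent accumulator by repeated find-first-separator-and-slice (objective: simpler).


-- ===== PORT A =====
-- state of A's main loop: (sents, current_sent, slides).
-- The slides dict's keys are exactly 0..lim-1, created in increasing order and never added or
-- removed afterwards, so it is ported EXACTLY as an Array indexed by key (an association-list
-- dict would make A's per-item loops over range(lim) quadratic and unevaluable); every index
-- taken from range(...) is nonnegative, so .toNat is exact.
abbrev AState := List (List String) × List String × Array (List String)

-- one iteration of A's 'for j, item in enumerate(data_stream)' body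
def aStep (left_slide right_slide lim_slide split_comma : Bool) (lim : Int)
    (st : AState) (ji : Int × String) : AState :=
  let sents := st.1
  let current_sent := st.2.1 ++ [ji.2]        -- current_sent.append(item)
  let slides := st.2.2
  let j := ji.1
  let item := ji.2
  if lim_slide = true then
    if j < lim then
      -- for i in range(j + 1): slides[i].append(item)   (keys 0..j exist, so in-bounds)
      (sents, current_sent,
        (PySem.List.pyRange 0 (j + 1) 1).foldl (fun a i => a.modify i.toNat (· ++ [item])) slides)
    else
      let current_slide := PySem.Int.mod j lim
      -- sents.append(slides[current_slide]); getD is exact here: the key exists on Pre_ (KeyError excluded)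
      let sents := sents ++ [slides.getD current_slide.toNat []]
      let slides := slides.setIfInBounds current_slide.toNat []   -- slides[current_slide] = []
      (sents, current_sent,
        (PySem.List.pyRange 0 lim 1).foldl (fun a i => a.modify i.toNat (· ++ [item])) slides)
  else
    let split : List Char := if split_comma then ['.', ','] else ['.']
    -- item[0]: none = IndexError, excluded by Pre_ (state kept unchanged in that dead arm);
    -- split's elements are the one-char strings '.' / ',' so Char membership is exact
    match PySem.Str.pyGet? item 0 with
    | none => (sents, current_sent, slides)
    | some c0 =>
      if c0 ∈ split then
        let sents :=
          if 3 ≤ (current_sent.length : Int) then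
            let sents :=
              if left_slide = true then
                -- sent_windows built by appends, then sents += sent_windows
                sents ++ (PySem.List.pyRange ((current_sent.length : Int) - 1) 1 (-1)).foldl
                  (fun w i => w ++ [PySem.List.slice current_sent none (some i)]) []
              else sents
            if right_slide = true then
              sents ++ (PySem.List.pyRange 1 ((current_sent.length : Int) - 1) 1).foldl
                (fun w i => w ++ [PySem.List.slice current_sent (some i) none]) []
            else sents
          else sents
        if 2 ≤ (current_sent.length : Int) then (sents ++ [current_sent], [], slides)
        else (sents, [], slides)
      else (sents, current_sent, slides)

def retrieve_sents (data_stream : List String) (left_slide : Bool) (right_slide : Bool) (lim_slide : Bool) (split_comma : Bool) (lim : Int) : List (List String) :=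
  -- slides = {}; for i in range(lim): slides[i] = []   (keys appended in increasing order)
  let slides0 : Array (List String) :=
    (PySem.List.pyRange 0 lim 1).foldl (fun a _ => a.push []) #[]
  let st := (PySem.List.enumerate data_stream 0).foldl
    (aStep left_slide right_slide lim_slide split_comma lim) ([], [], slides0)
  if lim_slide = true then
    (PySem.List.pyRange 0 lim 1).foldl
      (fun sents i => if (PySem.List.len (st.2.2.getD i.toNat [])) = lim then sents ++ [st.2.2.getD i.toNat []] else sents)
      st.1
  else
    if st.2.1 ≠ [] then st.1 ++ [st.2.1] else st.1

-- ===== PORT B =====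
-- 'item[0] in seps' (none = IndexError, excluded by Pre_)
def bIsSep (seps : List Char) (item : String) : Bool :=
  match PySem.Str.pyGet? item 0 with
  | some c => seps.contains c
  | none => false

-- B's while loop: find the first separator, slice the sentence off, recurse on the rest
def bLoop (left_slide right_slide : Bool) (seps : List Char)
    (sents : List (List String)) (rest : List String) : List (List String) :=
  match h : rest.findIdx? (bIsSep seps) with
  | none => if rest ≠ [] then sents ++ [rest] else sents
  | some k =>
    let sent := PySem.List.slice rest none (some ((k : Int) + 1))
    let rest' := PySem.List.slice rest (some ((k : Int) + 1)) none
    let n : Int := (k : Int) + 1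
    let sents :=
      if 3 ≤ n then
        let sents :=
          if left_slide then
            sents ++ (PySem.List.pyRange (n - 1) 1 (-1)).map (fun i => PySem.List.slice sent none (some i))
          else sents
        if right_slide then
          sents ++ (PySem.List.pyRange 1 (n - 1) 1).map (fun i => PySem.List.slice sent (some i) none)
        else sents
      else sents
    let sents := if 2 ≤ n then sents ++ [sent] else sents
    bLoop left_slide right_slide seps sents rest'
termination_by rest.length
decreasing_by
  have hk := List.findIdx?_eq_some_iff_findIdx_eq.mp h
  have hcast : ((k : Int) + 1) = ((k + 1 : Nat) : Int) := by push_cast; ring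
  rw [hcast, PySem.List.slice_from_natCast]
  simp
  omega

def retrieve_sents_alt (data_stream : List String) (left_slide : Bool) (right_slide : Bool) (lim_slide : Bool) (split_comma : Bool) (lim : Int) : List (List String) :=
  if lim_slide then
    if lim ≤ 0 then []
    else (PySem.List.pyRange 0 (PySem.List.len data_stream - lim + 1) 1).map
      (fun i => PySem.List.slice data_stream (some i) (some (i + lim)))
  else
    let seps : List Char := if split_comma then ['.', ','] else ['.']
    bLoop left_slide right_slide seps [] data_stream

-- ===== PRECONDITION & SPEC =====
-- Pre_ excludes exactly the inputs where A raises: lim_slide with lim ≤ 0 on a nonempty stream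
-- (ZeroDivisionError / KeyError), and an empty-string item in sentence mode (IndexError at item[0]).
def Pre_retrieve_sents (data_stream : List String) (left_slide : Bool) (right_slide : Bool) (lim_slide : Bool) (split_comma : Bool) (lim : Int) : Prop :=
  (lim_slide = true → (0 < lim ∨ data_stream = [])) ∧
  (lim_slide = false → ∀ s ∈ data_stream, s ≠ "")
instance (data_stream : List String) (left_slide : Bool) (right_slide : Bool) (lim_slide : Bool) (split_comma : Bool) (lim : Int) : Decidable (Pre_retrieve_sents data_stream left_slide right_slide lim_slide split_comma lim) := by unfold Pre_retrieve_sents; infer_instance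
def pvWitness_retrieve_sents : List String × Bool × Bool × Bool × Bool × Int :=
  (["a", "b", "c."], true, true, false, false, 0)

def Spec_retrieve_sents (data_stream : List String) (left_slide : Bool) (right_slide : Bool) (lim_slide : Bool) (split_comma : Bool) (lim : Int) (out : List (List String)) : Prop := out = retrieve_sents_alt data_stream left_slide right_slide lim_slide split_comma lim
instance (data_stream : List String) (left_slide : Bool) (right_slide : Bool) (lim_slide : Bool) (split_comma : Bool) (lim : Int) (out : List (List String)) : Decidable (Spec_retrieve_sents data_stream left_slide right_slide lim_slide split_comma lim out) := by unfold Spec_retrieve_sents; infer_instance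

-- ===== CLAIM (what is proved, stated in full; the proofs are below) =====
def Claim_equal_retrieve_sents : Prop := ∀ (data_stream : List String) (left_slide : Bool) (right_slide : Bool) (lim_slide : Bool) (split_comma : Bool) (lim : Int), Dom_retrieve_sents data_stream left_slide right_slide lim_slide split_comma lim → Pre_retrieve_sents data_stream left_slide right_slide lim_slide split_comma lim → Spec_retrieve_sents data_stream left_slide right_slide lim_slide split_comma lim (retrieve_sents data_stream left_slide right_slide lim_slide split_comma lim)
-- ===== LEMMAS AND PROOFS =====

-- ---- sentence mode (lim_slide = false) ----

-- the two window families of a finished sentence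
def winL (cs : List String) : List (List String) :=
  (PySem.List.pyRange ((cs.length : Int) - 1) 1 (-1)).map (fun i => PySem.List.slice cs none (some i))
def winR (cs : List String) : List (List String) :=
  (PySem.List.pyRange 1 ((cs.length : Int) - 1) 1).map (fun i => PySem.List.slice cs (some i) none)

-- everything emitted for one finished sentence cs
def sentEmit (l r : Bool) (cs : List String) : List (List String) :=
  (if 3 ≤ (cs.length : Int) then
     (if l = true then winL cs else []) ++ (if r = true then winR cs else [])
   else []) ++
  (if 2 ≤ (cs.length : Int) then [cs] else [])

-- common recursive description of sentence splitting (cs = sentence prefix read so far)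
def gSpec (l r : Bool) (seps : List Char) : List String → List String → List (List String)
  | cs, [] => if cs = [] then [] else [cs]
  | cs, x :: xs =>
    if bIsSep seps x then sentEmit l r (cs ++ [x]) ++ gSpec l r seps [] xs
    else gSpec l r seps (cs ++ [x]) xs

theorem emit_accum (l r : Bool) (sents : List (List String)) (cs : List String) (n : Int)
    (hn : n = (cs.length : Int)) :
    (if 2 ≤ n then
       (if 3 ≤ n then
          (if r = true then (if l = true then sents ++ winL cs else sents) ++ winR cs
           else (if l = true then sents ++ winL cs else sents))
        else sents) ++ [cs]
     else
       (if 3 ≤ n then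
          (if r = true then (if l = true then sents ++ winL cs else sents) ++ winR cs
           else (if l = true then sents ++ winL cs else sents))
        else sents))
    = sents ++ sentEmit l r cs := by
  subst hn
  unfold sentEmit
  split_ifs <;> simp_all

theorem gSpec_no_sep (l r : Bool) (seps : List Char) :
    ∀ (u : List String) (cs : List String), (∀ x ∈ u, bIsSep seps x = false) →
    gSpec l r seps cs u = if cs ++ u = [] then [] else [cs ++ u] := by
  intro u
  induction u with
  | nil => intro cs _; simp [gSpec]
  | cons x xs ih =>
    intro cs h
    rw [gSpec, h x (by simp), ih (cs ++ [x]) (fun y hy => h y (by simp [hy]))]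
    simp

theorem gSpec_append_no_sep (l r : Bool) (seps : List Char) :
    ∀ (u t cs : List String), (∀ x ∈ u, bIsSep seps x = false) →
    gSpec l r seps cs (u ++ t) = gSpec l r seps (cs ++ u) t := by
  intro u
  induction u with
  | nil => intro t cs _; simp
  | cons x xs ih =>
    intro t cs h
    rw [List.cons_append, gSpec, h x (by simp),
      ih t (cs ++ [x]) (fun y hy => h y (by simp [hy]))]
    simp

-- A's loop (sentence mode) plus its leftover step accumulates exactly gSpec
theorem aLoop_nolim (l r sc : Bool) (lim : Int) (seps : List Char)
    (hseps : seps = if sc then ['.', ','] else ['.']) :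
    ∀ (data : List String) (j0 : Int) (sents : List (List String)) (cs : List String)
      (slides : Array (List String)),
    (∀ s ∈ data, s ≠ "") →
    ((fun st => if st.2.1 ≠ [] then st.1 ++ [st.2.1] else st.1)
      ((PySem.List.enumerate data j0).foldl (aStep l r false sc lim) (sents, cs, slides)))
    = sents ++ gSpec l r seps cs data := by
  intro data
  induction data with
  | nil =>
    intro j0 sents cs slides _
    simp only [PySem.List.enumerate_nil, List.foldl_nil, gSpec]
    split_ifs <;> simp_all
  | cons x xs ih =>
    intro j0 sents cs slides hne
    have hx : x ≠ "" := hne x (by simp)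
    obtain ⟨c, hc⟩ : ∃ c, PySem.Str.pyGet? x 0 = some c := by
      cases hcl : x.toList with
      | nil => exact absurd (String.toList_inj.mp (by simp [hcl])) hx
      | cons a t => exact ⟨a, by simp [hcl]⟩
    have hc' : PySem.List.pyGet? x.toList 0 = some c := by simpa using hc
    have hbis : bIsSep seps x = decide (c ∈ seps) := by
      simp [bIsSep, hc']
    rw [PySem.List.enumerate_cons, List.foldl_cons]
    show (fun st => if st.2.1 ≠ [] then st.1 ++ [st.2.1] else st.1)
        ((PySem.List.enumerate xs (j0 + 1)).foldl (aStep l r false sc lim)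
          (aStep l r false sc lim (sents, cs, slides) (j0, x)))
      = sents ++ gSpec l r seps cs (x :: xs)
    rw [gSpec, hbis]
    by_cases hsep : c ∈ seps
    · have hstep : aStep l r false sc lim (sents, cs, slides) (j0, x)
          = ((if 2 ≤ ((cs ++ [x]).length : Int) then
               (if 3 ≤ ((cs ++ [x]).length : Int) then
                  (if r = true then (if l = true then sents ++ winL (cs ++ [x]) else sents) ++ winR (cs ++ [x])
                   else (if l = true then sents ++ winL (cs ++ [x]) else sents))
                else sents) ++ [cs ++ [x]]
             else
               (if 3 ≤ ((cs ++ [x]).length : Int) then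
                  (if r = true then (if l = true then sents ++ winL (cs ++ [x]) else sents) ++ winR (cs ++ [x])
                   else (if l = true then sents ++ winL (cs ++ [x]) else sents))
                else sents)), [], slides) := by
        rw [aStep]
        simp only [Bool.false_eq_true, if_false, hc]
        rw [← hseps]
        simp only [hsep, if_pos]
        rw [winL, winR,
          ← PySem.List.foldl_append_singleton_eq_map
            (f := fun i => PySem.List.slice (cs ++ [x]) none (some i)),
          ← PySem.List.foldl_append_singleton_eq_map
            (f := fun i => PySem.List.slice (cs ++ [x]) (some i) none)]
        split_ifs <;> simp_all
      rw [hstep, ih (j0 + 1) _ [] slides (fun s hs => hne s (by simp [hs])),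
        emit_accum l r sents (cs ++ [x]) ((cs ++ [x]).length : Int) rfl]
      simp [hsep, List.append_assoc]
    · have hstep : aStep l r false sc lim (sents, cs, slides) (j0, x) = (sents, cs ++ [x], slides) := by
        rw [aStep]
        simp only [Bool.false_eq_true, if_false, hc]
        rw [← hseps]
        simp [hsep]
      rw [hstep, ih (j0 + 1) _ (cs ++ [x]) slides (fun s hs => hne s (by simp [hs]))]
      simp [hsep]

-- B's loop accumulates exactly gSpec
theorem bLoop_eq (l r : Bool) (seps : List Char) :
    ∀ (N : Nat) (rest : List String) (sents : List (List String)), rest.length ≤ N →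
    bLoop l r seps sents rest = sents ++ gSpec l r seps [] rest := by
  intro N
  induction N with
  | zero =>
    intro rest sents hN
    have : rest = [] := by cases rest <;> simp_all
    subst this
    rw [bLoop]
    simp [gSpec]
  | succ N ih =>
    intro rest sents hN
    rw [bLoop]
    cases hf : rest.findIdx? (bIsSep seps) with
    | none =>
      have hall := List.findIdx?_eq_none_iff.mp hf
      rw [gSpec_no_sep l r seps rest [] (by simpa using hall)]
      simp only [List.nil_append]
      split_ifs <;> simp_all
    | some k =>
      obtain ⟨hk, hfx⟩ := List.findIdx?_eq_some_iff_findIdx_eq.mp hf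
      subst hfx
      set k := rest.findIdx (bIsSep seps) with hkdef
      have hsepk : bIsSep seps rest[k] = true := List.findIdx_getElem (w := hk)
      have hpre : ∀ x ∈ rest.take k, bIsSep seps x = false := by
        intro x hx
        obtain ⟨j, hj, rfl⟩ := List.mem_iff_getElem.mp hx
        have hjk : j < k := by simp [List.length_take] at hj; omega
        have := List.not_of_lt_findIdx (p := bIsSep seps) (xs := rest) (i := j) (by omega)
        simp only [List.getElem_take]
        simpa using this
      have hcast : ((k : Int) + 1) = ((k + 1 : Nat) : Int) := by push_cast; ring
      have hsent : PySem.List.slice rest none (some ((k : Int) + 1)) = rest.take k ++ [rest[k]] := by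
        rw [hcast, PySem.List.slice_to_natCast, List.take_succ_eq_append_getElem hk]
      have hrest' : PySem.List.slice rest (some ((k : Int) + 1)) none = rest.drop (k + 1) := by
        rw [hcast, PySem.List.slice_from_natCast]
      have hsplit : rest = rest.take k ++ rest[k] :: rest.drop (k + 1) := by
        conv_lhs => rw [← List.take_append_drop k rest, List.drop_eq_getElem_cons hk]
      have hg : gSpec l r seps [] rest
          = sentEmit l r (rest.take k ++ [rest[k]]) ++ gSpec l r seps [] (rest.drop (k + 1)) := by
        conv_lhs => rw [hsplit]
        rw [gSpec_append_no_sep l r seps _ _ _ hpre, gSpec, hsepk]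
        simp
      have hlen : ((rest.take k ++ [rest[k]]).length : Int) = (k : Int) + 1 := by
        simp [List.length_take]
        omega
      simp only []
      rw [hsent, hrest',
        ih (rest.drop (k + 1)) _ (by simp; omega)]
      rw [hg]
      rw [show (PySem.List.pyRange ((k : Int) + 1 - 1) 1 (-1)).map
            (fun i => PySem.List.slice (rest.take k ++ [rest[k]]) none (some i))
          = winL (rest.take k ++ [rest[k]]) by rw [winL, hlen],
        show (PySem.List.pyRange 1 ((k : Int) + 1 - 1) 1).map
            (fun i => PySem.List.slice (rest.take k ++ [rest[k]]) (some i) none)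
          = winR (rest.take k ++ [rest[k]]) by rw [winR, hlen]]
      rw [emit_accum l r sents (rest.take k ++ [rest[k]]) ((k : Int) + 1) hlen.symm]
      simp

-- ---- sliding-window mode (lim_slide = true, 0 < lim) ----

-- start index of buffer i after t processed items: the least index ≡ i (mod L) among the
-- last ≤ L processed ones (i itself during the fill phase, t when buffer i is still empty)
def wStart (L t i : Nat) : Nat := if i < t then i + L * ((t - 1 - i) / L) else t

-- contents of buffer i after t processed items
def wSeg (data : List String) (L t i : Nat) : List String := (data.take t).drop (wStart L t i)

theorem arrGetD_modify (a : Array (List String)) (i j : Nat) (f : List String → List String) :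
    (a.modify i f).getD j [] = if i = j ∧ j < a.size then f (a.getD j []) else a.getD j [] := by
  simp only [Array.getD_eq_getD_getElem?, Array.getElem?_modify]
  by_cases hj : j < a.size
  · by_cases hij : i = j <;> simp_all [Array.getElem?_eq_getElem]
  · have hn : a[j]? = none := Array.getElem?_eq_none (by omega)
    simp_all

theorem arrGetD_set (a : Array (List String)) (i j : Nat) (v : List String) :
    (a.setIfInBounds i v).getD j [] = if i = j ∧ j < a.size then v else a.getD j [] := by
  simp only [Array.getD_eq_getD_getElem?, Array.getElem?_setIfInBounds]
  by_cases hj : j < a.size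
  · by_cases hij : i = j <;> simp_all [Array.getElem?_eq_getElem]
  · have hn : a[j]? = none := Array.getElem?_eq_none (by omega)
    simp_all
    split_ifs <;> simp_all

theorem size_modifyFold (l : List Int) (x : String) :
    ∀ a : Array (List String), (l.foldl (fun a i => a.modify i.toNat (· ++ [x])) a).size = a.size := by
  induction l with
  | nil => intro a; rfl
  | cons i t ih => intro a; rw [List.foldl_cons, ih, Array.size_modify]

theorem arrGetD_push_lt (a : Array (List String)) (v : List String) (j : Nat) (h : j < a.size) :
    (a.push v).getD j [] = a.getD j [] := by
  simp only [Array.getD_eq_getD_getElem?, Array.getElem?_push]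
  simp_all [Array.getElem?_eq_getElem, show j ≠ a.size by omega]

theorem arrGetD_push_self (a : Array (List String)) (v : List String) :
    (a.push v).getD a.size [] = v := by
  simp [Array.getD_eq_getD_getElem?]

theorem getD_pushRange : ∀ (l : List Int) (a : Array (List String)),
    (∀ k, a.getD k [] = []) → ∀ k, (l.foldl (fun a _ => a.push []) a).getD k [] = [] := by
  intro l
  induction l with
  | nil => intro a h k; exact h k
  | cons i t ih =>
    intro a h k
    rw [List.foldl_cons]
    refine ih (a.push []) (fun k' => ?_) k
    rcases Nat.lt_trichotomy k' a.size with h1 | h1 | h1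
    · rw [arrGetD_push_lt a [] k' h1]; exact h k'
    · subst h1; exact arrGetD_push_self a []
    · rw [Array.getD_eq_getD_getElem?, Array.getElem?_eq_none (by simp; omega)]
      rfl

theorem size_pushRange : ∀ (l : List Int) (a : Array (List String)),
    (l.foldl (fun a _ => a.push []) a).size = a.size + l.length := by
  intro l
  induction l with
  | nil => intro a; simp
  | cons i t ih => intro a; rw [List.foldl_cons, ih, Array.size_push, List.length_cons]; omega

-- effect of 'for i in range(m): slides[i].append(x)' on entry k
theorem getD_modifyRange (m : Nat) (a : Array (List String)) (x : String) (hm : m ≤ a.size) :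
    ∀ k : Nat, ((PySem.List.pyRange 0 (m : Int) 1).foldl (fun a i => a.modify i.toNat (· ++ [x])) a).getD k []
    = if k < m then a.getD k [] ++ [x] else a.getD k [] := by
  induction m with
  | zero =>
    intro k
    rw [PySem.List.pyRange_one_eq_nil (by simp), List.foldl_nil, if_neg (by omega)]
  | succ m ih =>
    intro k
    rw [show ((m + 1 : Nat) : Int) = (m : Int) + 1 by push_cast; ring,
      PySem.List.pyRange_one_succ_right (by positivity), List.foldl_append]
    simp only [List.foldl_cons, List.foldl_nil, Int.toNat_natCast]
    rw [arrGetD_modify, size_modifyFold, ih (by omega)]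
    split_ifs <;> first | rfl | omega

theorem div_pred (L m : Nat) (h0 : 0 < L) (h1 : 0 < m) (h2 : ¬ L ∣ m) : (m - 1) / L = m / L := by
  have hd := Nat.div_add_mod m L
  have hr0 : 0 < m % L := Nat.pos_of_ne_zero (fun h => h2 (Nat.dvd_of_mod_eq_zero h))
  have hrL : m % L < L := Nat.mod_lt _ h0
  have h3 : m - 1 = L * (m / L) + (m % L - 1) := by omega
  rw [h3, Nat.mul_add_div h0, Nat.div_eq_of_lt (show m % L - 1 < L by omega), Nat.add_zero]

theorem not_dvd_sub (L t i : Nat) (hi : i < L) (hit : i ≤ t) (hne : i ≠ t % L) : ¬ L ∣ (t - i) := by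
  intro hdvd
  obtain ⟨c, hc⟩ := hdvd
  have : t = i + L * c := by omega
  have : t % L = i := by rw [this, Nat.add_mul_mod_self_left, Nat.mod_eq_of_lt hi]
  omega

theorem wStart_le (L t i : Nat) : wStart L t i ≤ t := by
  unfold wStart
  split_ifs with h
  · have := Nat.mul_div_le (t - 1 - i) L
    omega
  · omega

theorem wStart_fill (L t i : Nat) (h : t ≤ L) (hi : i < t) : wStart L t i = i := by
  unfold wStart
  rw [if_pos hi, Nat.div_eq_of_lt (show t - 1 - i < L by omega), Nat.mul_zero, Nat.add_zero]

theorem wStart_empty (L t i : Nat) (h : t ≤ i) : wStart L t i = t := by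
  unfold wStart
  rw [if_neg (by omega)]

theorem wStart_emit (L t : Nat) (h0 : 0 < L) (hL : L ≤ t) : wStart L t (t % L) = t - L := by
  have hd := Nat.div_add_mod t L
  have hr : t % L < L := Nat.mod_lt _ h0
  have hq : 1 ≤ t / L := (Nat.one_le_div_iff h0).mpr hL
  have hq1 : t / L = (t / L - 1) + 1 := by omega
  have hLq : L * (t / L) = L * (t / L - 1) + L := by nth_rewrite 1 [hq1]; rw [Nat.mul_succ]
  unfold wStart
  rw [if_pos (by omega)]
  have h3 : t - 1 - t % L = L * (t / L - 1) + (L - 1) := by omega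
  rw [h3, Nat.mul_add_div h0, Nat.div_eq_of_lt (show L - 1 < L by omega), Nat.add_zero]
  omega

theorem wStart_clear (L t : Nat) (h0 : 0 < L) (hL : L ≤ t) : wStart L (t + 1) (t % L) = t := by
  have hd := Nat.div_add_mod t L
  have hr : t % L < L := Nat.mod_lt _ h0
  unfold wStart
  rw [if_pos (by omega)]
  have h3 : t + 1 - 1 - t % L = L * (t / L) := by omega
  rw [h3, Nat.mul_div_cancel_left _ h0]
  omega

theorem wStart_keep (L t i : Nat) (h0 : 0 < L) (hL : L ≤ t) (hi : i < L) (hne : i ≠ t % L) :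
    wStart L (t + 1) i = wStart L t i := by
  have hit : i < t := by omega
  unfold wStart
  rw [if_pos (by omega), if_pos hit]
  have h1 : t + 1 - 1 - i = t - i := by omega
  have h2 : t - 1 - i = (t - i) - 1 := by omega
  rw [h1, h2, div_pred L (t - i) h0 (by omega) (not_dvd_sub L t i hi (by omega) hne)]

theorem wSeg_zero (data : List String) (L i : Nat) : wSeg data L 0 i = [] := by
  simp [wSeg]

theorem wSeg_append (data : List String) (L t i : Nat) (ht : t < data.length)
    (hs : wStart L (t + 1) i = wStart L t i) (hle : wStart L t i ≤ t) :
    wSeg data L (t + 1) i = wSeg data L t i ++ [data[t]] := by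
  unfold wSeg
  rw [List.take_succ_eq_append_getElem ht, hs,
    List.drop_append_of_le_length (by simp [List.length_take]; omega)]

theorem wSeg_len (data : List String) (L t i : Nat) (ht : t ≤ data.length) :
    (wSeg data L t i).length = t - wStart L t i := by
  simp [wSeg, List.length_take]
  omega

-- one step of the sliding-window invariant, all cases
theorem wSeg_succ_fill (data : List String) (L t i : Nat) (ht : t < data.length) (htL : t < L) (hi : i < L) :
    wSeg data L (t + 1) i
    = if i ≤ t then wSeg data L t i ++ [data[t]] else wSeg data L t i := by
  split_ifs with hit
  · rcases Nat.lt_or_ge i t with h | h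
    · exact wSeg_append data L t i ht
        (by rw [wStart_fill L (t+1) i (by omega) (by omega), wStart_fill L t i (by omega) h])
        (by rw [wStart_fill L t i (by omega) h]; omega)
    · have hieq : i = t := by omega
      exact wSeg_append data L t i ht
        (by rw [hieq, wStart_fill L (t+1) t (by omega) (by omega), wStart_empty L t t (le_refl _)])
        (by rw [hieq, wStart_empty L t t (le_refl _)])
  · unfold wSeg
    rw [wStart_empty L (t+1) i (by omega), wStart_empty L t i (by omega)]
    simp [List.drop_eq_nil_of_le, List.length_take]

theorem wSeg_succ_main (data : List String) (L t i : Nat) (h0 : 0 < L) (ht : t < data.length)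
    (htL : L ≤ t) (hi : i < L) :
    wSeg data L (t + 1) i
    = (if i = t % L then [] else wSeg data L t i) ++ [data[t]] := by
  split_ifs with hit
  · subst hit
    unfold wSeg
    rw [wStart_clear L t h0 htL, List.take_succ_eq_append_getElem ht,
      List.drop_append_of_le_length (by simp [List.length_take]; omega)]
    simp [List.drop_eq_nil_of_le, List.length_take]
  · exact wSeg_append data L t i ht (wStart_keep L t i h0 htL hi hit)
      (le_trans (wStart_le L t i) (le_refl t))

-- the loop invariant: sents collects one window per index j ∈ [t, n) with L ≤ j, and
-- buffer i ends up holding wSeg at n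
theorem aLoop_lim (l r sc : Bool) (lim : Int) (hlim : 0 < lim) (data : List String) :
    ∀ (rest : List String) (t : Nat) (sents : List (List String)) (cs : List String)
      (slides : Array (List String)),
    data.drop t = rest → t ≤ data.length → slides.size = lim.toNat →
    (∀ i : Nat, i < lim.toNat → slides.getD i [] = wSeg data lim.toNat t i) →
    ((PySem.List.enumerate rest (t : Int)).foldl (aStep l r true sc lim) (sents, cs, slides)).1
      = sents ++ ((List.range' t (data.length - t)).filter (fun j => lim.toNat ≤ j)).map
          (fun j => (data.take j).drop (j - lim.toNat))
    ∧ ∀ i : Nat, i < lim.toNat →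
        ((PySem.List.enumerate rest (t : Int)).foldl (aStep l r true sc lim) (sents, cs, slides)).2.2.getD i []
        = wSeg data lim.toNat data.length i := by
  have hcastlim : lim = ((lim.toNat : Nat) : Int) := by omega
  intro rest
  induction rest with
  | nil =>
    intro t sents cs slides hdrop ht hsz hinv
    have htn : t = data.length := by
      have := List.drop_eq_nil_iff.mp hdrop
      omega
    subst htn
    simp only [PySem.List.enumerate_nil, List.foldl_nil]
    refine ⟨by simp, fun i hi => hinv i hi⟩
  | cons x xs ih =>
    intro t sents cs slides hdrop ht hsz hinv
    have htlt : t < data.length := by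
      by_contra h
      rw [List.drop_eq_nil_of_le (by omega)] at hdrop
      simp at hdrop
    have hx : x = data[t] := by
      have := List.drop_eq_getElem_cons htlt
      rw [this] at hdrop
      exact ((List.cons.injEq _ _ _ _).mp hdrop).1.symm
    have hxs : data.drop (t + 1) = xs := by
      have := List.drop_eq_getElem_cons htlt
      rw [this] at hdrop
      exact ((List.cons.injEq _ _ _ _).mp hdrop).2
    rw [PySem.List.enumerate_cons, List.foldl_cons]
    set L := lim.toNat with hLdef
    rcases Nat.lt_or_ge t L with htL | htL
    · -- fill phase: j < lim
      have hstep : aStep l r true sc lim (sents, cs, slides) ((t : Int), x)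
          = (sents, cs ++ [x],
             (PySem.List.pyRange 0 ((t : Int) + 1) 1).foldl (fun a i => a.modify i.toNat (· ++ [x])) slides) := by
        rw [aStep, if_pos rfl, if_pos (show (t : Int) < lim by omega)]
      rw [hstep, show (t : Int) + 1 = ((t + 1 : Nat) : Int) by push_cast; ring]
      have hsz' : ((PySem.List.pyRange 0 ((t + 1 : Nat) : Int) 1).foldl
          (fun a i => a.modify i.toNat (· ++ [x])) slides).size = L := by
        rw [size_modifyFold, hsz]
      have hinv' : ∀ i : Nat, i < L →
          ((PySem.List.pyRange 0 ((t + 1 : Nat) : Int) 1).foldl (fun a i => a.modify i.toNat (· ++ [x])) slides).getD i []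
          = wSeg data L (t + 1) i := by
        intro i hi
        rw [getD_modifyRange (t + 1) slides x (by omega) i,
          wSeg_succ_fill data L t i htlt htL hi, hx, hinv i hi]
        split_ifs <;> first | rfl | omega
      have hrec := ih (t + 1) sents (cs ++ [x]) _ hxs (by omega) hsz' hinv'
      refine ⟨?_, hrec.2⟩
      rw [hrec.1]
      have hrange : List.range' t (data.length - t) = t :: List.range' (t + 1) (data.length - (t + 1)) := by
        rw [show data.length - t = (data.length - (t + 1)) + 1 by omega, List.range'_succ]
      rw [hrange]
      simp only [List.filter_cons]
      rw [if_neg (show ¬ (decide (L ≤ t) = true) by simp; omega)]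
    · -- steady phase: j >= lim, emit slides[j % lim]
      have hmod : (PySem.Int.mod (t : Int) lim).toNat = t % L := by
        rw [hcastlim, PySem.Int.mod_natCast]
        exact Int.toNat_natCast _
      have hstep : aStep l r true sc lim (sents, cs, slides) ((t : Int), x)
          = (sents ++ [slides.getD (t % L) []], cs ++ [x],
             (PySem.List.pyRange 0 lim 1).foldl (fun a i => a.modify i.toNat (· ++ [x]))
               (slides.setIfInBounds (t % L) [])) := by
        rw [aStep, if_pos rfl, if_neg (show ¬ ((t : Int) < lim) by omega)]
        dsimp only
        rw [hmod]
      rw [hstep, show (t : Int) + 1 = ((t + 1 : Nat) : Int) by push_cast; ring]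
      have hgot : slides.getD (t % L) [] = (data.take t).drop (t - L) := by
        rw [hinv (t % L) (Nat.mod_lt _ (by omega)), wSeg, wStart_emit L t (by omega) htL]
      have hsz' : ((PySem.List.pyRange 0 lim 1).foldl (fun a i => a.modify i.toNat (· ++ [x]))
          (slides.setIfInBounds (t % L) [])).size = L := by
        rw [size_modifyFold, Array.size_setIfInBounds, hsz]
      have hinv' : ∀ i : Nat, i < L →
          ((PySem.List.pyRange 0 lim 1).foldl (fun a i => a.modify i.toNat (· ++ [x]))
            (slides.setIfInBounds (t % L) [])).getD i []
          = wSeg data L (t + 1) i := by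
        intro i hi
        rw [hcastlim, getD_modifyRange L _ x (by rw [Array.size_setIfInBounds, hsz]) i,
          if_pos hi, arrGetD_set, wSeg_succ_main data L t i (by omega) htlt htL hi, hx]
        by_cases heq : i = t % L
        · rw [if_pos ⟨heq.symm, by omega⟩, if_pos heq]
        · rw [if_neg (by rw [hsz]; exact fun hc => heq hc.1.symm), if_neg heq, hinv i hi]
      have hrec := ih (t + 1) (sents ++ [slides.getD (t % L) []]) (cs ++ [x]) _ hxs
        (by omega) hsz' hinv'
      refine ⟨?_, hrec.2⟩
      rw [hrec.1]
      have hrange : List.range' t (data.length - t) = t :: List.range' (t + 1) (data.length - (t + 1)) := by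
        rw [show data.length - t = (data.length - (t + 1)) + 1 by omega, List.range'_succ]
      rw [hrange]
      simp only [List.filter_cons]
      rw [if_pos (show decide (L ≤ t) = true by simpa using htL), hgot]
      simp [List.append_assoc]

theorem filter_range_of_single (L v : Nat) (p : Nat → Bool) (hv : v < L)
    (hp : ∀ i, i < L → (p i = true ↔ i = v)) : (List.range L).filter p = [v] := by
  induction L with
  | zero => omega
  | succ L ihL =>
    rw [List.range_succ, List.filter_append]
    rcases Nat.lt_or_ge v L with h | h
    · rw [ihL h (fun i hi => hp i (by omega))]
      have : p L = false := by
        by_contra hf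
        have := (hp L (by omega)).mp (by revert hf; cases p L <;> simp)
        omega
      simp [this]
    · have hvL : v = L := by omega
      subst hvL
      have h1 : (List.range v).filter p = [] := by
        rw [List.filter_eq_nil_iff]
        intro a ha
        have := List.mem_range.mp ha
        intro hpa
        have := (hp a (by omega)).mp hpa
        omega
      have h2 : p v = true := (hp v (by omega)).mpr rfl
      simp [h1, h2]

theorem filter_range_none (L : Nat) (p : Nat → Bool) (hp : ∀ i, i < L → p i = false) :
    (List.range L).filter p = [] := by
  rw [List.filter_eq_nil_iff]
  intro a ha
  simp [hp a (List.mem_range.mp ha)]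

theorem filter_range_ge (L : Nat) : ∀ n, (List.range n).filter (fun j => decide (L ≤ j)) = List.range' L (n - L) := by
  intro n
  induction n with
  | zero => simp
  | succ n ihn =>
    rw [List.range_succ, List.filter_append, ihn]
    rcases Nat.lt_or_ge n L with h | h
    · rw [show n + 1 - L = 0 by omega, show n - L = 0 by omega]
      simp
      omega
    · rw [show n + 1 - L = (n - L) + 1 by omega, List.range'_1_concat,
        show L + (n - L) = n by omega]
      simp [h]

theorem wStart_window_iff (L n k : Nat) (h0 : 0 < L) (hk : k < L) :
    n - wStart L n k = L ↔ L ≤ n ∧ k = n % L := by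
  constructor
  · intro h
    have hle := wStart_le L n k
    have hLn : L ≤ n := by omega
    refine ⟨hLn, ?_⟩
    have hs : wStart L n k = n - L := by omega
    have hkn : k < n := by omega
    have hmod : wStart L n k % L = k := by
      unfold wStart
      rw [if_pos hkn, Nat.add_mul_mod_self_left, Nat.mod_eq_of_lt hk]
    rw [hs] at hmod
    have h2 : (n - L) % L = n % L := by
      conv_rhs => rw [show n = (n - L) + L by omega]
      rw [Nat.add_mod_right]
    omega
  · rintro ⟨hLn, rfl⟩
    rw [wStart_emit L n h0 hLn]
    omega

-- the sliding-window mode as a whole: A's buffers+tail = B's direct slices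
theorem lim_total (l r sc : Bool) (lim : Int) (hlim : 0 < lim) (data : List String) :
    retrieve_sents data l r true sc lim = retrieve_sents_alt data l r true sc lim := by
  have hcastlim : lim = ((lim.toNat : Nat) : Int) := by omega
  set L := lim.toNat with hLdef
  set n := data.length with hn
  have h0L : 0 < L := by omega
  have hinv0 : ∀ i : Nat, i < L →
      ((PySem.List.pyRange 0 lim 1).foldl (fun a _ => a.push []) #[]).getD i [] = wSeg data L 0 i := by
    intro i _
    rw [getD_pushRange _ #[] (fun k => rfl) i, wSeg_zero]
  have hsz0 : ((PySem.List.pyRange 0 lim 1).foldl (fun a _ => a.push ([] : List String)) #[]).size = L := by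
    rw [size_pushRange, PySem.List.length_pyRange_one]
    simp
    omega
  have hmain := aLoop_lim l r sc lim hlim data data 0 [] []
    ((PySem.List.pyRange 0 lim 1).foldl (fun a _ => a.push []) #[])
    List.drop_zero (by omega) hsz0 hinv0
  rw [Nat.cast_zero] at hmain
  unfold retrieve_sents retrieve_sents_alt
  rw [if_pos rfl, if_pos rfl, if_neg (show ¬ lim ≤ 0 by omega)]
  set ST := (PySem.List.enumerate data 0).foldl (aStep l r true sc lim)
    ([], [], (PySem.List.pyRange 0 lim 1).foldl (fun a _ => a.push []) #[]) with hST
  rw [show (List.foldl (fun (sents : List (List String)) (i : Int) =>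
        if PySem.List.len (ST.2.2.getD i.toNat []) = lim then sents ++ [ST.2.2.getD i.toNat []] else sents)
        ST.1 (PySem.List.pyRange 0 lim 1))
      = ST.1 ++ ((PySem.List.pyRange 0 lim 1).filter
          (fun i => decide (PySem.List.len (ST.2.2.getD i.toNat []) = lim))).map
          (fun i => ST.2.2.getD i.toNat [])
    from PySem.List.foldl_append_ite
      (p := fun (i : Int) => PySem.List.len (ST.2.2.getD i.toNat []) = lim)
      (f := fun (i : Int) => ST.2.2.getD i.toNat []) _ _]
  rw [hmain.1]
  -- evaluate the tail filter: exactly the last full window survives (iff L ≤ n)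
  have hcond : ∀ k : Nat, k < L →
      ((PySem.List.len (ST.2.2.getD k []) = lim) ↔ (L ≤ n ∧ k = n % L)) := by
    intro k hk
    rw [hmain.2 k hk, PySem.List.len_eq, wSeg_len data L n k (le_refl _), hcastlim, Nat.cast_inj]
    exact wStart_window_iff L n k h0L hk
  have htailrange : PySem.List.pyRange 0 lim 1 = (List.range L).map (fun (k : Nat) => (k : Int)) := by
    rw [hcastlim, PySem.List.pyRange_one, show (((L : Nat) : Int) - 0).toNat = L by omega]
    exact List.map_congr_left (fun k _ => by omega)
  rw [htailrange, List.filter_map, List.map_map]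
  have htail :
      (List.range L).filter ((fun i => decide (PySem.List.len (ST.2.2.getD i.toNat []) = lim))
        ∘ (fun (k : Nat) => (k : Int)))
      = if L ≤ n then [n % L] else [] := by
    split_ifs with hLn
    · exact filter_range_of_single L (n % L) _ (Nat.mod_lt _ h0L)
        (fun i hi => by
          simp only [Function.comp_apply, Int.toNat_natCast]
          rw [decide_eq_true_iff, hcond i hi]
          simp [hLn])
    · exact filter_range_none L _
        (fun i hi => by
          simp only [Function.comp_apply, Int.toNat_natCast]
          rw [decide_eq_false_iff_not, hcond i hi]
          simp
          omega)
  rw [htail]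
  -- normalise A's emitted windows to slices
  rw [Nat.sub_zero, ← List.range_eq_range', filter_range_ge, List.range'_eq_map_range, List.map_map]
  have hwinmap :
      (List.range (n - L)).map ((fun j => (data.take j).drop (j - L)) ∘ (L + ·))
      = (List.range (n - L)).map (fun k => (data.drop k).take L) := by
    apply List.map_congr_left
    intro k _
    simp only [Function.comp_apply]
    rw [show L + k - L = k by omega, List.drop_take, show L + k - k = L by omega]
  rcases Nat.lt_or_ge n L with hnL | hnL
  · -- fewer items than the window size: both sides empty
    rw [show n - L = 0 by omega]
    simp only [List.range_zero, List.map_nil, List.nil_append, if_neg (by omega : ¬ L ≤ n)]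
    rw [hcastlim, PySem.List.len_eq,
      PySem.List.pyRange_one_eq_nil (show ((data.length : Int) - ((L : Nat) : Int) + 1) ≤ 0 by omega)]
    simp
  · -- at least one window
    rw [hwinmap, if_pos hnL]
    have hB : PySem.List.pyRange 0 (PySem.List.len data - lim + 1) 1
        = (List.range (n - L + 1)).map (fun (k : Nat) => (k : Int)) := by
      rw [PySem.List.len_eq, ← hn, hcastlim,
        show (n : Int) - ((L : Nat) : Int) + 1 = ((n - L + 1 : Nat) : Int) by push_cast; omega,
        PySem.List.pyRange_one, show (((n - L + 1 : Nat) : Int) - 0).toNat = n - L + 1 by omega]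
      exact List.map_congr_left (fun k _ => by omega)
    rw [hB, List.map_map]
    have hBmap : (List.range (n - L + 1)).map
          ((fun i => PySem.List.slice data (some i) (some (i + lim))) ∘ (fun (k : Nat) => (k : Int)))
        = (List.range (n - L + 1)).map (fun k => (data.drop k).take L) := by
      apply List.map_congr_left
      intro k _
      simp only [Function.comp_apply]
      rw [hcastlim, PySem.List.slice_natCast_add]
    rw [hBmap, List.range_succ, List.map_append]
    simp only [List.map_cons, List.map_nil, List.nil_append]
    congr 1
    have hlast : wSeg data L n (n % L) = (data.drop (n - L)).take L := by
      rw [wSeg, wStart_emit L n h0L hnL,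
        show data.take n = data by rw [hn]; exact List.take_length]
      exact (List.take_of_length_le (by rw [List.length_drop]; omega)).symm
    simp only [Function.comp_apply, Int.toNat_natCast]
    rw [hmain.2 (n % L) (Nat.mod_lt _ h0L), hlast]

-- ===== VERDICT (by name: the statement is the Claim_ definition above) =====
theorem retrieve_sents_spec : Claim_equal_retrieve_sents := by
  intro data l r ls sc lim hdom hpre
  unfold Spec_retrieve_sents
  cases ls with
  | false =>
    have hne : ∀ s ∈ data, s ≠ "" := hpre.2 rfl
    have hA := aLoop_nolim l r sc lim (if sc then ['.', ','] else ['.']) rfl data 0 [] []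
      ((PySem.List.pyRange 0 lim 1).foldl (fun a _ => a.push []) #[]) hne
    simp only [] at hA
    have hB := bLoop_eq l r (if sc then ['.', ','] else ['.']) data.length data [] (le_refl _)
    unfold retrieve_sents retrieve_sents_alt
    rw [if_neg (show ¬ (false = true) by simp), if_neg (show ¬ (false = true) by simp)]
    simp only []
    rw [hA, hB]
  | true =>
    rcases hpre.1 rfl with hlim | hdata
    · exact lim_total l r sc lim hlim data
    · subst hdata
      by_cases h0 : 0 < lim
      · exact lim_total l r sc lim h0 []
      · unfold retrieve_sents retrieve_sents_alt
        rw [if_pos rfl, if_pos (show lim ≤ 0 by omega)]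
        simp only [PySem.List.enumerate_nil, List.foldl_nil,
          PySem.List.pyRange_one_eq_nil (show lim ≤ 0 by omega), List.foldl_nil]
        simp
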